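-- pv_equiv track=rewrite | github.com/DrakeSeteraO/4_Bit_K_map_solver | segment_solver.py | score_value
-- ===== SOURCE A (Python) =====
-- def score_value(possibility: str) -> int:
--     score = 0
--     for p in possibility:
--         if p.isalpha():
--             score += 1
--         elif p == "'":
--             score -= 1
--     return score
-- ===== SOURCE B (Python) =====
-- def score_value(possibility: str) -> int:
--     freq = {}
--     for ch in possibility:
--         freq[ch] = freq.get(ch, 0) + 1
--     total = 0
--     for ch, n in freq.items():
--         if ch.isalpha():
--             total += n
--     return total - freq.get("'", 0)
-- ===== Notes on version B (the rewrite author's own statement) =====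
-- stated objective: alternative
-- what changed: B first builds a character-frequency dictionary in one pass and then aggregates over the distinct characters (summing the multiplicities of the alphabetic keys and looking up the apostrophe's multiplicity), instead of A's single per-character branching accumulator loop.
import Mathlib
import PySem

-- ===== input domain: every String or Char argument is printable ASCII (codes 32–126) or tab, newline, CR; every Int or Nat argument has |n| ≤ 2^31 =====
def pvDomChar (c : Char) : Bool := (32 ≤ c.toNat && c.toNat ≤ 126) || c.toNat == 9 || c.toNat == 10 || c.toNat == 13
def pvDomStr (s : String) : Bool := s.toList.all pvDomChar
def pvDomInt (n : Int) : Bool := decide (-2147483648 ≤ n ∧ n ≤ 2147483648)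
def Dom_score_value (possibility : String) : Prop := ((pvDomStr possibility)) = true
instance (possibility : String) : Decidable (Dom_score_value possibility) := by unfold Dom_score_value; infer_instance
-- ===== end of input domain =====

-- B builds a character-frequency dictionary in one pass, then aggregates over the distinct
-- characters (alphabetic multiplicities summed, apostrophe multiplicity looked up); objective: alternative.

-- ===== PORT A =====
-- A: score = 0; for p: if p.isalpha(): score += 1 elif p == "'": score -= 1
def score_value (possibility : String) : Int :=
  possibility.toList.foldl
    (fun score p =>
      if PySem.Chars.isalpha p then score + 1
      else if p == '\'' then score - 1
      else score) 0

-- ===== PORT B =====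
-- B: freq = {}; for ch: freq[ch] = freq.get(ch, 0) + 1; then sum multiplicities of
-- alphabetic keys over freq.items() and subtract freq.get("'", 0).
def score_value_alt (possibility : String) : Int :=
  let freq : PySem.Dict Char Int :=
    possibility.toList.foldl (fun d ch => d.insert ch (d.getD ch 0 + 1)) PySem.Dict.empty
  let total : Int :=
    freq.items.foldl (fun t p => if PySem.Chars.isalpha p.1 then t + p.2 else t) 0
  total - freq.getD '\'' 0

-- ===== PRECONDITION & SPEC =====
def Spec_score_value (possibility : String) (out : Int) : Prop := out = score_value_alt possibility
instance (possibility : String) (out : Int) : Decidable (Spec_score_value possibility out) := by unfold Spec_score_value; infer_instance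

-- ===== CLAIM (what is proved, stated in full; the proofs are below) =====
def Claim_equal_score_value : Prop := ∀ (possibility : String), Dom_score_value possibility → Spec_score_value possibility (score_value possibility)

-- ===== LEMMAS AND PROOFS =====

-- A's interleaved loop equals (alpha count) - (apostrophe count).
theorem pv_foldl_eq (l : List Char) (acc : Int) :
    l.foldl (fun score p =>
      if PySem.Chars.isalpha p then score + 1
      else if p == '\'' then score - 1
      else score) acc
    = acc + (l.countP (fun c => PySem.Chars.isalpha c) : Int) - (l.count '\'' : Int) := by
  induction l generalizing acc with
  | nil => simp
  | cons hd t ih =>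
    simp only [List.foldl_cons, List.countP_cons, List.count_cons, ih]
    by_cases ha : PySem.Chars.isalpha hd
    · have : ¬ (hd == '\'') := by
        intro h; rw [beq_iff_eq.mp h] at ha; exact absurd ha (by decide)
      simp [ha, this]; ring
    · by_cases hq : hd == '\''
      · simp [ha, hq]; ring
      · simp [ha, hq]

-- Summing 'if alpha k ∧ k = x then 1 else 0' over a Nodup list containing x picks out x once.
theorem pv_sum_indicator (S : List Char) (x : Char) (hnd : S.Nodup) (hx : x ∈ S) :
    (S.map (fun k => if PySem.Chars.isalpha k ∧ k = x then (1 : Int) else 0)).sum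
    = if PySem.Chars.isalpha x then (1 : Int) else 0 := by
  induction S with
  | nil => simp at hx
  | cons hd t ih =>
    simp only [List.map_cons, List.sum_cons]
    rcases List.mem_cons.mp hx with rfl | hxt
    · have hnot : x ∉ t := (List.nodup_cons.mp hnd).1
      have : (t.map (fun k => if PySem.Chars.isalpha k ∧ k = x then (1 : Int) else 0)).sum = 0 := by
        rw [List.sum_eq_zero]
        intro y hy
        obtain ⟨k, hk, rfl⟩ := List.mem_map.mp hy
        have : k ≠ x := fun h => hnot (h ▸ hk)
        simp [this]
      rw [this]
      by_cases ha : PySem.Chars.isalpha x <;> simp [ha]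
    · have hne : hd ≠ x := fun h => (List.nodup_cons.mp hnd).1 (h ▸ hxt)
      rw [ih (List.nodup_cons.mp hnd).2 hxt]
      simp [hne]

-- Aggregating counts of the alphabetic members of any Nodup superset recovers countP.
theorem pv_sum_counts (l S : List Char) (hnd : S.Nodup) (hsub : ∀ y ∈ l, y ∈ S) :
    (S.map (fun k => if PySem.Chars.isalpha k then (l.count k : Int) else 0)).sum
    = (l.countP (fun c => PySem.Chars.isalpha c) : Int) := by
  induction l with
  | nil => simp [List.sum_eq_zero]
  | cons x t ih =>
    have hsplit : (S.map (fun k => if PySem.Chars.isalpha k then ((x :: t).count k : Int) else 0))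
        = S.map (fun k => (if PySem.Chars.isalpha k then (t.count k : Int) else 0)
            + (if PySem.Chars.isalpha k ∧ k = x then (1 : Int) else 0)) := by
      apply List.map_congr_left
      intro k _
      by_cases ha : PySem.Chars.isalpha k
      · by_cases hk : k = x
        · subst hk; simp [ha]
        · have hxk : ¬ x = k := fun h => hk h.symm
          simp [ha, hxk, hk]
      · simp [ha]
    rw [hsplit, PySem.List.sum_map_add_int,
        ih (fun y hy => hsub y (List.mem_cons_of_mem _ hy)),
        pv_sum_indicator S x hnd (hsub x (List.mem_cons_self ..))]
    simp only [List.countP_cons]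
    by_cases ha : PySem.Chars.isalpha x <;> simp [ha]

-- ===== VERDICT (by name: the statement is the Claim_ definition above) =====
theorem score_value_spec : Claim_equal_score_value := by
  intro possibility _
  unfold Spec_score_value score_value score_value_alt
  rw [pv_foldl_eq]
  set l := possibility.toList with hl
  rw [PySem.Dict.foldl_insert_getD_add_one_eq_counter]
  have hfold : ∀ L : List (Char × Int),
      L.foldl (fun t p => if PySem.Chars.isalpha p.1 then t + p.2 else t) 0
      = (L.map (fun p => if PySem.Chars.isalpha p.1 then p.2 else 0)).sum := by
    intro L
    have : (fun (t : Int) (p : Char × Int) => if PySem.Chars.isalpha p.1 then t + p.2 else t)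
        = (fun t p => t + (if PySem.Chars.isalpha p.1 then p.2 else 0)) := by
      funext t p; by_cases h : PySem.Chars.isalpha p.1 <;> simp [h]
    rw [this, PySem.List.foldl_add]
    simp
  simp only [PySem.Dict.getD_counter, PySem.Dict.items_counter, hfold, List.map_map]
  have : ((fun p : Char × Int => if PySem.Chars.isalpha p.1 then p.2 else 0)
      ∘ (fun k => (k, (l.count k : Int))))
      = (fun k => if PySem.Chars.isalpha k then (l.count k : Int) else 0) := by
    funext k; simp
  rw [this, pv_sum_counts l (PySem.Set.ofList l)
      (by rw [← PySem.List.dedup_eq_ofList]; exact PySem.List.nodup_dedup l)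
      (fun y hy => (PySem.Set.mem_ofList ..).mpr hy)]
  ring
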